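-- pv_equiv track=rewrite | github.com/obosio/STOCHASTIC_PREDICTOR | Test/scripts/dependency_check.py | resolve_imports
-- ===== SOURCE A (Python) =====
-- from typing import Any, Mapping
--
-- def resolve_imports(
--     modules: set[str],
--     mapping: Mapping[str, list[str]],
-- ) -> tuple[set[str], set[str], dict[str, str]]:
--     resolved = set()
--     unresolved = set()
--     module_to_dist = {}
--     for module in modules:
--         dists = mapping.get(module)
--         if not dists:
--             unresolved.add(module)
--             continue
--         dist_name = dists[0]
--         module_to_dist[module] = dist_name
--         resolved.add(dist_name)
--     return resolved, unresolved, module_to_dist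
-- ===== SOURCE B (Python) =====
-- def resolve_imports(modules, mapping):
--     # Divide and conquer: solve each half independently, then merge the three
--     # results with set-union / dict-merge, instead of one accumulating pass.
--     def go(ms):
--         if not ms:
--             return set(), set(), {}
--         if len(ms) == 1:
--             m = ms[0]
--             dists = mapping.get(m)
--             if dists:
--                 return {dists[0]}, set(), {m: dists[0]}
--             return set(), {m}, {}
--         k = len(ms) // 2
--         r1, u1, d1 = go(ms[:k])
--         r2, u2, d2 = go(ms[k:])
--         return r1 | r2, u1 | u2, {**d1, **d2}
--     return go(list(modules))
-- ===== Notes on version B (the rewrite author's own statement) =====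
-- stated objective: alternative
-- what changed: A makes one linear pass accumulating resolved/unresolved/module_to_dist in mutable state; B is a divide-and-conquer recursion that solves each half of the module list independently and merges the half-results with set unions and a dict merge.
import Mathlib
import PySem

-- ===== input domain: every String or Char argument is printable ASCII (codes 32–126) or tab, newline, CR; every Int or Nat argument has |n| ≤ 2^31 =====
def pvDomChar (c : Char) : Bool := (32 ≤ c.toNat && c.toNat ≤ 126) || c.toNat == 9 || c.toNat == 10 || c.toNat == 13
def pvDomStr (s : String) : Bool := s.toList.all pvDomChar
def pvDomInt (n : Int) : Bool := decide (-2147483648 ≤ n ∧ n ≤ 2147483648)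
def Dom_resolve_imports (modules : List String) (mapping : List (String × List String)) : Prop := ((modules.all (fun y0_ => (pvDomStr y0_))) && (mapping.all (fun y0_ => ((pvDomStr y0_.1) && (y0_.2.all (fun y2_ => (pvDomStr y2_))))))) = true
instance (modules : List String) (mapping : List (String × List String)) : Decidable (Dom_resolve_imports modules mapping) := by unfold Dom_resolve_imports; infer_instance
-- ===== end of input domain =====

-- B replaces A's single accumulating pass by a divide-and-conquer recursion that solves each
-- half of the module list and merges the half-results with set unions and a dict merge
-- (objective: alternative decomposition, same observable results).

-- ===== PORT A =====
-- A's loop body (branches in A's order: falsy lookup → unresolved, else record the first dist).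
def pvStepA (mp : PySem.Dict String (List String))
    (st : PySem.Set String × PySem.Set String × PySem.Dict String String) (m : String) :
    PySem.Set String × PySem.Set String × PySem.Dict String String :=
  match mp.get? m with
  | none => (st.1, PySem.Set.add st.2.1 m, st.2.2)
  | some [] => (st.1, PySem.Set.add st.2.1 m, st.2.2)
  | some (x :: _) => (PySem.Set.add st.1 x, st.2.1, st.2.2.insert m x)

def resolve_imports (modules : List String) (mapping : List (String × List String)) :
    List String × List String × (List (String × String)) :=
  let mp : PySem.Dict String (List String) := PySem.Dict.mk mapping
  let st := modules.foldl (pvStepA mp) (PySem.Set.empty, PySem.Set.empty, PySem.Dict.mk [])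
  (st.1, st.2.1, st.2.2.items)

-- ===== PORT B =====
-- {**d1, **d2}: start from d1 and insert d2's items in order
def pvDictMerge (d e : PySem.Dict String String) : PySem.Dict String String :=
  e.items.foldl (fun d p => d.insert p.1 p.2) d

-- Source B's recursive go; ms[:k] / ms[k:] with 0 ≤ k ≤ len(ms) are take/drop
-- (PySem.List.slice_to / slice_from), and len(ms)//2 on a Nat length is Nat division.
def pvGoB (mp : PySem.Dict String (List String)) :
    List String → PySem.Set String × PySem.Set String × PySem.Dict String String
  | [] => (PySem.Set.empty, PySem.Set.empty, PySem.Dict.mk [])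
  | [m] =>
      match mp.get? m with
      | some (x :: _) => ([x], PySem.Set.empty, PySem.Dict.mk [(m, x)])
      | _ => (PySem.Set.empty, [m], PySem.Dict.mk [])
  | m₀ :: m₁ :: rest =>
      let k := (m₀ :: m₁ :: rest).length / 2
      let g1 := pvGoB mp ((m₀ :: m₁ :: rest).take k)
      let g2 := pvGoB mp ((m₀ :: m₁ :: rest).drop k)
      (PySem.Set.union g1.1 g2.1, PySem.Set.union g1.2.1 g2.2.1, pvDictMerge g1.2.2 g2.2.2)
  termination_by ms => ms.length
  decreasing_by
  · simp [List.length_take]; omega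
  · simp [List.length_drop]; omega

def resolve_imports_alt (modules : List String) (mapping : List (String × List String)) :
    List String × List String × (List (String × String)) :=
  let mp : PySem.Dict String (List String) := PySem.Dict.mk mapping
  let g := pvGoB mp modules
  (g.1, g.2.1, g.2.2.items)

-- ===== PRECONDITION & SPEC =====
def Spec_resolve_imports (modules : List String) (mapping : List (String × List String)) (out : List String × List String × (List (String × String))) : Prop := out = resolve_imports_alt modules mapping
instance (modules : List String) (mapping : List (String × List String)) (out : List String × List String × (List (String × String))) : Decidable (Spec_resolve_imports modules mapping out) := by unfold Spec_resolve_imports; infer_instance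

-- ===== CLAIM (what is proved, stated in full; the proofs are below) =====
def Claim_equal_resolve_imports : Prop := ∀ (modules : List String) (mapping : List (String × List String)), Dom_resolve_imports modules mapping → Spec_resolve_imports modules mapping (resolve_imports modules mapping)

-- ===== LEMMAS AND PROOFS =====

-- every entry of the dict is (k, first element of mapping[k])
def pvInv (mp : PySem.Dict String (List String)) (d : PySem.Dict String String) : Prop :=
  ∀ p ∈ d.items, ∃ tl, mp.get? p.1 = some (p.2 :: tl)

def pvVal (mp : PySem.Dict String (List String)) (k : String) : String :=
  match mp.get? k with
  | some (x :: _) => x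
  | _ => ""

-- how the two halves' results recombine with a pending state
def pvComb (st g : PySem.Set String × PySem.Set String × PySem.Dict String String) :
    PySem.Set String × PySem.Set String × PySem.Dict String String :=
  (PySem.Set.update st.1 g.1, PySem.Set.update st.2.1 g.2.1, pvDictMerge st.2.2 g.2.2)

lemma pvUpdate_subset (s S : List String) (h : ∀ x ∈ s, x ∈ S) :
    PySem.Set.update S s = S := by
  induction s generalizing S with
  | nil => exact PySem.Set.update_nil S
  | cons x s ih =>
    rw [PySem.Set.update_cons, PySem.Set.add_of_mem (h x (by simp))]
    exact ih S (fun y hy => h y (by simp [hy]))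

lemma pvUpdate_absorb (t s S : List String) (h : ∀ x ∈ s, x ∈ S) :
    PySem.Set.update S (PySem.Set.update s t) = PySem.Set.update S t := by
  induction t generalizing s S with
  | nil => rw [PySem.Set.update_nil]; exact pvUpdate_subset s S h
  | cons x t ih =>
    rw [PySem.Set.update_cons, PySem.Set.update_cons]
    by_cases hx : x ∈ s
    · rw [PySem.Set.add_of_mem hx, PySem.Set.add_of_mem (h x hx)]
      exact ih s S h
    · rw [PySem.Set.add_of_not_mem hx]
      by_cases hS : x ∈ S
      · rw [PySem.Set.add_of_mem hS]
        have hsub : ∀ y ∈ s ++ [x], y ∈ S := by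
          intro y hy
          rcases List.mem_append.mp hy with hy | hy
          · exact h y hy
          · simp at hy; exact hy ▸ hS
        exact ih (s ++ [x]) S hsub
      · rw [PySem.Set.add_of_not_mem hS]
        have hsub : ∀ y ∈ s ++ [x], y ∈ S ++ [x] := by
          intro y hy; rcases List.mem_append.mp hy with hy | hy
          · exact List.mem_append.mpr (Or.inl (h y hy))
          · exact List.mem_append.mpr (Or.inr hy)
        rw [← ih (s ++ [x]) (S ++ [x]) hsub]
        -- both sides are update (S ++ [x]) rest for the same rest
        rw [PySem.Set.update_eq_append_filter (s ++ [x]) t]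
        rw [PySem.Set.update_append, PySem.Set.update_append, PySem.Set.update_append]
        rw [pvUpdate_subset s S h,
            pvUpdate_subset (s ++ [x]) (S ++ [x]) hsub]
        have : PySem.Set.update S [x] = S ++ [x] := by
          rw [PySem.Set.update_cons, PySem.Set.update_nil, PySem.Set.add_of_not_mem hS]
        rw [this]

lemma pvUpdate_assoc (u g1 g2 : List String) :
    PySem.Set.update u (PySem.Set.update g1 g2) =
      PySem.Set.update (PySem.Set.update u g1) g2 := by
  have hsub : ∀ x ∈ g1, x ∈ PySem.Set.update u g1 :=
    fun x hx => (PySem.Set.mem_update u g1 x).mpr (Or.inr hx)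
  calc PySem.Set.update u (PySem.Set.update g1 g2)
      = PySem.Set.update u (g1 ++ List.filter (fun y => !PySem.Set.contains g1 y) (PySem.Set.ofList g2)) := by
        rw [← PySem.Set.update_eq_append_filter]
    _ = PySem.Set.update (PySem.Set.update (PySem.Set.update u g1) g1)
          (List.filter (fun y => !PySem.Set.contains g1 y) (PySem.Set.ofList g2)) := by
        rw [PySem.Set.update_append, pvUpdate_subset g1 (PySem.Set.update u g1) hsub]
    _ = PySem.Set.update (PySem.Set.update u g1)
          (g1 ++ List.filter (fun y => !PySem.Set.contains g1 y) (PySem.Set.ofList g2)) := by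
        rw [PySem.Set.update_append]
    _ = PySem.Set.update (PySem.Set.update u g1) (PySem.Set.update g1 g2) := by
        rw [← PySem.Set.update_eq_append_filter]
    _ = PySem.Set.update (PySem.Set.update u g1) g2 :=
        pvUpdate_absorb g2 g1 (PySem.Set.update u g1) hsub

lemma pvDictMerge_pred (P : String × String → Prop) (l : List (String × String))
    (d : PySem.Dict String String)
    (hd : ∀ p ∈ d.items, P p) (hl : ∀ p ∈ l, P p) :
    ∀ p ∈ (l.foldl (fun d p => d.insert p.1 p.2) d).items, P p := by
  induction l generalizing d with
  | nil => exact hd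
  | cons q l ih =>
    simp only [List.foldl_cons]
    refine ih (d.insert q.1 q.2) ?_ (fun p hp => hl p (by simp [hp]))
    intro p hp
    rcases (PySem.Dict.mem_items_insert d q.1 q.2 p).mp hp with h | ⟨h, _⟩
    · have : P q := hl q (by simp)
      simpa [h] using this
    · exact hd p h

lemma pvInv_merge (mp : PySem.Dict String (List String)) (d e : PySem.Dict String String)
    (hd : pvInv mp d) (he : pvInv mp e) : pvInv mp (pvDictMerge d e) :=
  pvDictMerge_pred (fun p => ∃ tl, mp.get? p.1 = some (p.2 :: tl)) e.items d hd he

lemma pvKeys_merge (d e : PySem.Dict String String) :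
    (pvDictMerge d e).keys = PySem.Set.update d.keys e.keys :=
  PySem.Dict.keys_foldl_insert_key e.items Prod.fst (fun _ p => p.2) d

lemma pvItems_of_inv (mp : PySem.Dict String (List String)) (d : PySem.Dict String String)
    (h : pvInv mp d) : d.items = d.keys.map (fun k => (k, pvVal mp k)) := by
  have hk : d.keys = d.items.map Prod.fst := by simp [PySem.Dict.keys]
  rw [hk, List.map_map]
  have : ∀ p ∈ d.items, ((fun k => (k, pvVal mp k)) ∘ Prod.fst) p = id p := by
    intro p hp
    obtain ⟨tl, htl⟩ := h p hp
    simp [Function.comp, pvVal, htl]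
  rw [List.map_congr_left this, List.map_id]

lemma pvDict_ext_of_inv (mp : PySem.Dict String (List String)) (d e : PySem.Dict String String)
    (hd : pvInv mp d) (he : pvInv mp e) (hk : d.keys = e.keys) : d = e := by
  apply PySem.Dict.ext
  rw [pvItems_of_inv mp d hd, pvItems_of_inv mp e he, hk]

lemma pvDictMerge_assoc (mp : PySem.Dict String (List String))
    (d e1 e2 : PySem.Dict String String)
    (hd : pvInv mp d) (h1 : pvInv mp e1) (h2 : pvInv mp e2) :
    pvDictMerge (pvDictMerge d e1) e2 = pvDictMerge d (pvDictMerge e1 e2) := by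
  refine pvDict_ext_of_inv mp _ _
    (pvInv_merge mp _ _ (pvInv_merge mp _ _ hd h1) h2)
    (pvInv_merge mp _ _ hd (pvInv_merge mp _ _ h1 h2)) ?_
  rw [pvKeys_merge, pvKeys_merge, pvKeys_merge, pvKeys_merge, pvUpdate_assoc]

-- structural facts about B's go: its set parts are Sets (Nodup), its dict satisfies pvInv
-- with Nodup keys
lemma pvGoB_props (mp : PySem.Dict String (List String)) (ms : List String) :
    (pvGoB mp ms).1.Nodup ∧ (pvGoB mp ms).2.1.Nodup ∧
      (pvGoB mp ms).2.2.keys.Nodup ∧ pvInv mp (pvGoB mp ms).2.2 := by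
  induction ms using pvGoB.induct mp with
  | case1 =>
    refine ⟨by simp [pvGoB], by simp [pvGoB], by simp [pvGoB, PySem.Dict.keys], ?_⟩
    intro p hp; simp [pvGoB] at hp
  | case2 m x tl hm =>
    refine ⟨by simp [pvGoB, hm], by simp [pvGoB, hm], by simp [pvGoB, hm, PySem.Dict.keys], ?_⟩
    intro p hp
    simp [pvGoB, hm] at hp
    exact ⟨tl, by simp [hp, hm]⟩
  | case3 m hm =>
    refine ⟨by simp [pvGoB], by simp [pvGoB], by simp [pvGoB, PySem.Dict.keys], ?_⟩
    intro p hp; simp [pvGoB] at hp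
  | case4 m₀ m₁ rest k ih1 ih2 =>
    have hgo : pvGoB mp (m₀ :: m₁ :: rest) =
        (PySem.Set.union (pvGoB mp ((m₀ :: m₁ :: rest).take k)).1
           (pvGoB mp ((m₀ :: m₁ :: rest).drop k)).1,
         PySem.Set.union (pvGoB mp ((m₀ :: m₁ :: rest).take k)).2.1
           (pvGoB mp ((m₀ :: m₁ :: rest).drop k)).2.1,
         pvDictMerge (pvGoB mp ((m₀ :: m₁ :: rest).take k)).2.2
           (pvGoB mp ((m₀ :: m₁ :: rest).drop k)).2.2) := by
      conv_lhs => rw [pvGoB]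
    obtain ⟨h11, h12, h1k, h1i⟩ := ih1
    obtain ⟨h21, h22, h2k, h2i⟩ := ih2
    rw [hgo]
    exact ⟨PySem.Set.nodup_union _ _ h11, PySem.Set.nodup_union _ _ h12,
      by rw [pvKeys_merge]; exact PySem.Set.nodup_update _ _ h1k,
      pvInv_merge mp _ _ h1i h2i⟩

-- the main invariant: folding A's step from any state st computes pvComb st (go ms)
lemma pvMain (mp : PySem.Dict String (List String)) (ms : List String) :
    ∀ st, pvInv mp st.2.2 →
      ms.foldl (pvStepA mp) st = pvComb st (pvGoB mp ms) := by
  induction ms using pvGoB.induct mp with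
  | case1 =>
    intro st _
    simp only [List.foldl_nil, pvGoB, pvComb, pvDictMerge, PySem.Set.empty]
    rw [PySem.Set.update_nil, PySem.Set.update_nil]
  | case2 m x tl hm =>
    intro st _
    simp only [List.foldl_cons, List.foldl_nil, pvGoB, hm, pvComb, pvDictMerge, pvStepA,
      PySem.Set.empty, PySem.Set.update_cons, PySem.Set.update_nil]
  | case3 m hm =>
    intro st _
    simp only [List.foldl_cons, List.foldl_nil, pvGoB, pvComb, pvDictMerge]
    rcases hg : mp.get? m with _ | ⟨_ | ⟨x, tl⟩⟩
    · simp only [pvStepA, hg]; rfl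
    · simp only [pvStepA, hg]; rfl
    · exact (hm x tl hg).elim
  | case4 m₀ m₁ rest k ih1 ih2 =>
    intro st hinv
    have hsplit : (m₀ :: m₁ :: rest) =
        (m₀ :: m₁ :: rest).take k ++ (m₀ :: m₁ :: rest).drop k :=
      (List.take_append_drop k _).symm
    have hgo : pvGoB mp (m₀ :: m₁ :: rest) =
        (PySem.Set.union (pvGoB mp ((m₀ :: m₁ :: rest).take k)).1
           (pvGoB mp ((m₀ :: m₁ :: rest).drop k)).1,
         PySem.Set.union (pvGoB mp ((m₀ :: m₁ :: rest).take k)).2.1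
           (pvGoB mp ((m₀ :: m₁ :: rest).drop k)).2.1,
         pvDictMerge (pvGoB mp ((m₀ :: m₁ :: rest).take k)).2.2
           (pvGoB mp ((m₀ :: m₁ :: rest).drop k)).2.2) := by
      conv_lhs => rw [pvGoB]
    obtain ⟨_, _, _, h1i⟩ := pvGoB_props mp ((m₀ :: m₁ :: rest).take k)
    obtain ⟨_, _, _, h2i⟩ := pvGoB_props mp ((m₀ :: m₁ :: rest).drop k)
    conv_lhs => rw [hsplit]
    rw [List.foldl_append, ih1 st hinv,
        ih2 _ (pvInv_merge mp _ _ hinv h1i), hgo]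
    simp only [pvComb, PySem.Set.union]
    rw [pvUpdate_assoc, pvUpdate_assoc, pvDictMerge_assoc mp _ _ _ hinv h1i h2i]

lemma pvDictMerge_empty (mp : PySem.Dict String (List String)) (e : PySem.Dict String String)
    (he : pvInv mp e) (hk : e.keys.Nodup) :
    pvDictMerge (PySem.Dict.mk []) e = e := by
  have hempty : pvInv mp (PySem.Dict.mk []) := by
    intro p hp; simp at hp
  refine pvDict_ext_of_inv mp _ _ (pvInv_merge mp _ _ hempty he) he ?_
  rw [pvKeys_merge]
  have : (PySem.Dict.mk ([] : List (String × String))).keys = [] := by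
    simp [PySem.Dict.keys]
  rw [this]
  rw [PySem.Set.update_nil_left, PySem.Set.ofList_eq_self_of_nodup _ hk]

-- ===== VERDICT (by name: the statement is the Claim_ definition above) =====
theorem resolve_imports_spec : Claim_equal_resolve_imports := by
  intro modules mapping _
  simp only [Spec_resolve_imports, resolve_imports, resolve_imports_alt]
  obtain ⟨h1, h2, hk, hi⟩ := pvGoB_props (PySem.Dict.mk mapping) modules
  rw [pvMain (PySem.Dict.mk mapping) modules _ (by intro p hp; simp at hp)]
  simp only [pvComb, PySem.Set.empty]
  rw [PySem.Set.update_nil_left, PySem.Set.update_nil_left,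
      PySem.Set.ofList_eq_self_of_nodup _ h1, PySem.Set.ofList_eq_self_of_nodup _ h2,
      pvDictMerge_empty (PySem.Dict.mk mapping) _ hi hk]
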